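-- pv_equiv track=rewrite | github.com/ComfyAssets/ComfyUI-KikoTools | kikotools/tools/xyz_grid/utils/cache_manager.py | _optimize_load_order
-- ===== SOURCE A (Python) =====
-- from typing import Dict, Any, Optional, List, Tuple
--
-- def _optimize_load_order(items: List[str]) -> List[str]:
--     """Optimize loading order to minimize model switches.
--
--     Args:
--         items: List of items (may have duplicates)
--
--     Returns:
--         Optimized order
--     """
--     # Group consecutive items together
--     optimized = []
--     seen = set()
--
--     for item in items:
--         if item not in seen:
--             # Add all instances of this item consecutively
--             count = items.count(item)
--             optimized.extend([item] * count)
--             seen.add(item)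
--
--     return optimized
-- ===== SOURCE B (Python) =====
-- from typing import List
--
-- def _optimize_load_order(items: List[str]) -> List[str]:
--     """Group duplicates consecutively in first-appearance order via a stable sort."""
--     first_index = {}
--     for i, item in enumerate(items):
--         if item not in first_index:
--             first_index[item] = i
--     return sorted(items, key=lambda x: first_index[x])
-- ===== Notes on version B (the rewrite author's own statement) =====
-- stated objective: faster
-- what changed: Replaced A's seen-set loop with an O(n) items.count scan per distinct element by building a first-occurrence index table in one pass and returning one stable sort keyed on it.
import Mathlib
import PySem

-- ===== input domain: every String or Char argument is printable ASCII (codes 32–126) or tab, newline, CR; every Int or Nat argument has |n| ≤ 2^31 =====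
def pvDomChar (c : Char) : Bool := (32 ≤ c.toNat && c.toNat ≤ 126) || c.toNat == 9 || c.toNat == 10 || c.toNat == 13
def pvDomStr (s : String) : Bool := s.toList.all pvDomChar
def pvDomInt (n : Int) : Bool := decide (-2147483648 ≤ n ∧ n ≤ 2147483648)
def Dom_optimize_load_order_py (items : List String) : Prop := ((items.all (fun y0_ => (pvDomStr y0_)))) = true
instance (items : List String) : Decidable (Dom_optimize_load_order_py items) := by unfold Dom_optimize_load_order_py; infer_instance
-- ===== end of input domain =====

-- B replaces A's seen-set loop with inner items.count scans (O(n*d)) by a first-occurrence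
-- index table built in one pass plus one stable sort keyed on it (objective: faster).

-- ===== PORT A =====
-- A: for each item, if unseen, extend output with items.count(item) copies and mark seen.
def optimize_load_order_py (items : List String) : List String :=
  (items.foldl
    (fun (st : List String × PySem.Set String) item =>
      if !(PySem.Set.contains st.2 item) then
        (st.1 ++ PySem.List.pyRepeat [item] ((items.count item : Nat) : Int), PySem.Set.add st.2 item)
      else st)
    ([], PySem.Set.empty)).1

-- ===== PORT B =====
-- B: first_index[item] = index of first occurrence; stable sort by that key.
-- Python's first_index[x] cannot raise here (every x in items is a key), so getD is exact.
def optimize_load_order_py_alt (items : List String) : List String :=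
  let fi : PySem.Dict String Int :=
    (items.zipIdx).foldl
      (fun d p => if !(PySem.Dict.contains d p.1) then PySem.Dict.insert d p.1 ((p.2 : Nat) : Int) else d)
      PySem.Dict.empty
  PySem.List.sorted items (fun x => PySem.Dict.getD fi x 0)

-- ===== PRECONDITION & SPEC =====
def Spec_optimize_load_order_py (items : List String) (out : List String) : Prop := out = optimize_load_order_py_alt items
instance (items : List String) (out : List String) : Decidable (Spec_optimize_load_order_py items out) := by unfold Spec_optimize_load_order_py; infer_instance

-- ===== CLAIM (what is proved, stated in full; the proofs are below) =====
def Claim_equal_optimize_load_order_py : Prop := ∀ (items : List String), Dom_optimize_load_order_py items → Spec_optimize_load_order_py items (optimize_load_order_py items)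

-- ===== LEMMAS AND PROOFS =====

theorem pvBeqFalse {a b : String} (h : ¬ a = b) : (a == b) = false := by simp [h]

theorem pvBeqComm (a b : String) : (a == b) = decide (b = a) := by
  by_cases h : a = b
  · subst h; simp
  · simp [h, Ne.symm h]

-- the elements of l not yet in s, first occurrences in order (proof-side description of A's loop)
def pvNewOnes (s : PySem.Set String) : List String → List String
  | [] => []
  | x :: l => if PySem.Set.contains s x then pvNewOnes s l else x :: pvNewOnes (PySem.Set.add s x) l

-- A's loop, closed form
theorem pvALoop (items : List String) (l : List String) (acc : List String) (seen : PySem.Set String) :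
    l.foldl
      (fun (st : List String × PySem.Set String) item =>
        if !(PySem.Set.contains st.2 item) then
          (st.1 ++ PySem.List.pyRepeat [item] ((items.count item : Nat) : Int), PySem.Set.add st.2 item)
        else st)
      (acc, seen)
    = (acc ++ (pvNewOnes seen l).flatMap (fun x => List.replicate (items.count x) x),
       l.foldl PySem.Set.add seen) := by
  induction l generalizing acc seen with
  | nil => simp [pvNewOnes]
  | cons x l ih =>
    by_cases h : PySem.Set.contains seen x
    · simp only [List.foldl_cons, pvNewOnes, h, if_pos, Bool.not_true, PySem.Set.add]
      exact ih acc seen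
    · simp only [List.foldl_cons, pvNewOnes, h, Bool.not_false, if_true, if_neg,
        Bool.false_eq_true, not_false_iff]
      rw [ih]
      simp [PySem.List.pyRepeat_singleton]

theorem pvNewOnes_ofList (l : List String) : ∀ s, s ++ pvNewOnes s l = l.foldl PySem.Set.add s := by
  induction l with
  | nil => simp [pvNewOnes]
  | cons x l ih =>
    intro s
    by_cases h : PySem.Set.contains s x
    · simp only [pvNewOnes, h, if_pos, List.foldl_cons, PySem.Set.add]
      exact ih s
    · simp only [pvNewOnes, h, Bool.false_eq_true, reduceIte, List.foldl_cons, PySem.Set.add]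
      rw [← ih (s ++ [x])]
      simp

theorem pvA_closed (items : List String) :
    optimize_load_order_py items
      = (PySem.Set.ofList items).flatMap (fun x => List.replicate (items.count x) x) := by
  unfold optimize_load_order_py
  have h : pvNewOnes [] items = List.foldl PySem.Set.add [] items := by
    have := pvNewOnes_ofList items []
    simpa using this
  rw [pvALoop]
  simp [PySem.Set.empty, PySem.Set.ofList_eq_foldl, h]

-- foldl add over a set prefix, as a filter of ofList
theorem pvFoldlAdd_filter (l : List String) : ∀ s : PySem.Set String,
    l.foldl PySem.Set.add s = s ++ (PySem.Set.ofList l).filter (fun y => !(PySem.Set.contains s y)) := by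
  induction l with
  | nil => simp [PySem.Set.ofList]
  | cons x l ih =>
    intro s
    have hx : PySem.Set.ofList (x :: l) = List.foldl PySem.Set.add [x] l := by
      simp [PySem.Set.ofList_eq_foldl, PySem.Set.add, PySem.Set.contains]
    by_cases h : PySem.Set.contains s x
    · simp only [List.foldl_cons, PySem.Set.add, h, if_pos]
      rw [ih s, hx, ih [x], List.filter_append]
      have hx0 : List.filter (fun y => !PySem.Set.contains s y) [x] = [] := by
        simp [PySem.Set.contains, List.filter_cons]
        simpa [PySem.Set.contains, List.contains_eq_mem] using h
      rw [hx0, List.nil_append]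
      congr 1
      rw [List.filter_filter]
      apply List.filter_congr
      intro y _
      simp only [PySem.Set.contains, List.contains_eq_mem, List.mem_singleton]
      by_cases hy : y ∈ s
      · simp [hy]
      · have : ¬ (y = x) := by
          intro e; subst e
          simp only [PySem.Set.contains, List.contains_eq_mem] at h
          exact hy (by simpa using h)
        simp [hy, this]
    · simp only [List.foldl_cons, PySem.Set.add, h, Bool.false_eq_true, reduceIte]
      rw [ih (s ++ [x]), hx, ih [x], List.singleton_append, List.filter_cons]
      rw [if_pos (by simpa [PySem.Set.contains] using h : (!PySem.Set.contains s x) = true)]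
      simp only [List.append_assoc, List.singleton_append]
      congr 2
      rw [List.filter_filter]
      apply List.filter_congr
      intro y _
      simp only [PySem.Set.contains, List.contains_eq_mem, List.mem_singleton, List.mem_append]
      by_cases hy : y ∈ s
      · simp [hy]
      · by_cases hyx : y = x <;> simp [hy, hyx]

theorem pvOfList_cons (x : String) (l : List String) :
    PySem.Set.ofList (x :: l) = x :: (PySem.Set.ofList l).filter (fun y => !(y == x)) := by
  have h1 : PySem.Set.ofList (x :: l) = List.foldl PySem.Set.add [x] l := by
    simp [PySem.Set.ofList_eq_foldl, PySem.Set.add, PySem.Set.contains]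
  rw [h1, pvFoldlAdd_filter]
  simp only [List.singleton_append, List.cons.injEq, true_and]
  apply List.filter_congr
  intro y _
  simp [PySem.Set.contains, List.contains_eq_mem, pvBeqComm, eq_comm]

-- the distinct elements in first-appearance order are strictly ordered by first index
theorem pvOfList_pairwise_idxOf (l : List String) :
    (PySem.Set.ofList l).Pairwise (fun a b => l.idxOf a < l.idxOf b) := by
  induction l with
  | nil => simp [PySem.Set.ofList]
  | cons x l ih =>
    rw [pvOfList_cons]
    constructor
    · intro b hb
      have hbne : b ≠ x := by simpa using (List.mem_filter.mp hb).2
      rw [List.idxOf_cons, List.idxOf_cons]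
      simp only [beq_self_eq_true, cond_true]
      rw [pvBeqFalse (fun e => hbne e.symm)]
      simp
    · apply List.Pairwise.imp_of_mem (R := fun a b => l.idxOf a < l.idxOf b)
      · intro a b ha hb hab
        have hane : a ≠ x := by simpa using (List.mem_filter.mp ha).2
        have hbne : b ≠ x := by simpa using (List.mem_filter.mp hb).2
        rw [List.idxOf_cons, List.idxOf_cons, pvBeqFalse (fun e => hane e.symm),
          pvBeqFalse (fun e => hbne e.symm)]
        simpa using hab
      · exact List.Pairwise.filter _ ih

-- B's first-index table returns the first-occurrence index on every member
theorem pvFiLoop (l : List String) : ∀ (k : Nat) (d : PySem.Dict String Int) (x : String),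
    PySem.Dict.getD
      ((l.zipIdx k).foldl
        (fun d p => if !(PySem.Dict.contains d p.1) then PySem.Dict.insert d p.1 ((p.2 : Nat) : Int) else d)
        d) x 0
    = if PySem.Dict.contains d x then PySem.Dict.getD d x 0
      else if x ∈ l then ((k + l.idxOf x : Nat) : Int)
      else PySem.Dict.getD d x 0 := by
  induction l with
  | nil => intro k d x; simp
  | cons y l ih =>
    intro k d x
    rw [List.zipIdx_cons, List.foldl_cons]
    by_cases hy : PySem.Dict.contains d y
    · simp only [hy, Bool.not_true, Bool.false_eq_true, reduceIte]
      rw [ih]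
      by_cases hx : PySem.Dict.contains d x
      · simp [hx]
      · have hxy : x ≠ y := by intro e; subst e; exact hx hy
        simp only [hx, Bool.false_eq_true, reduceIte, List.mem_cons, hxy, false_or]
        by_cases hm : x ∈ l
        · simp only [hm, if_pos, List.idxOf_cons]
          rw [pvBeqFalse (fun e => hxy e.symm)]
          simp only [cond_false]
          congr 1
          omega
        · simp [hm]
    · simp only [hy, Bool.not_false, if_true]
      rw [ih]
      rw [PySem.Dict.contains_insert]
      by_cases hxy : x = y
      · subst hxy
        simp only [beq_self_eq_true, Bool.true_or, if_pos, reduceIte, hy, Bool.false_eq_true,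
          List.mem_cons, true_or, List.idxOf_cons_self]
        rw [PySem.Dict.getD_insert]
        simp
      · have hbne : (x == y) = false := pvBeqFalse hxy
        simp only [hbne, Bool.false_or]
        rw [PySem.Dict.getD_insert]
        simp only [hxy, reduceIte, List.mem_cons, false_or]
        by_cases hx : PySem.Dict.contains d x
        · simp [hx]
        · simp only [hx, Bool.false_eq_true, reduceIte]
          by_cases hm : x ∈ l
          · simp only [hm, if_pos, List.idxOf_cons]
            rw [pvBeqFalse (fun e => hxy e.symm)]
            simp only [cond_false]
            congr 1
            omega
          · simp [hm]

theorem pvKey_eq_idxOf (items : List String) (x : String) (hx : x ∈ items) :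
    (fun x => PySem.Dict.getD
      ((items.zipIdx).foldl
        (fun d p => if !(PySem.Dict.contains d p.1) then PySem.Dict.insert d p.1 ((p.2 : Nat) : Int) else d)
        PySem.Dict.empty) x 0) x = ((items.idxOf x : Nat) : Int) := by
  have h := pvFiLoop items 0 PySem.Dict.empty x
  simp only []
  rw [h]
  simp [PySem.Dict.contains_empty, hx]

-- a sum of an indicator over a nodup list
theorem pvSum_ite (v : String) (n : String → Nat) (d : List String) (hd : d.Nodup) :
    (d.map (fun x => if x = v then n x else 0)).sum = if v ∈ d then n v else 0 := by
  induction d with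
  | nil => simp
  | cons x d ih =>
    rcases List.nodup_cons.mp hd with ⟨hx, hd'⟩
    by_cases hxv : x = v
    · subst hxv
      simp [hx, ih hd']
    · simp only [List.map_cons, List.sum_cons, hxv, reduceIte, Nat.zero_add, List.mem_cons]
      rw [ih hd']
      simp [Ne.symm hxv]

-- grouping a list by its distinct elements is a permutation of it
theorem pvPerm (items : List String) :
    ((PySem.Set.ofList items).flatMap (fun x => List.replicate (items.count x) x)).Perm items := by
  rw [List.perm_iff_count]
  intro v
  rw [List.count_flatMap]
  have : (PySem.Set.ofList items).map
      (List.count v ∘ fun x => List.replicate (items.count x) x)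
      = (PySem.Set.ofList items).map (fun x => if x = v then items.count x else 0) := by
    apply List.map_congr_left
    intro x _
    simp only [Function.comp_apply, List.count_replicate]
    by_cases h : x = v <;> simp [h]
  rw [this, pvSum_ite v _ _ (PySem.Set.nodup_ofList items)]
  by_cases hv : v ∈ items
  · simp [PySem.Set.mem_ofList, hv]
  · simp [PySem.Set.mem_ofList, hv, List.count_eq_zero_of_not_mem hv]

-- pairwise key-≤ lifts from the distinct list to the grouped list
theorem pvPairwise_flatMap {κ : Type} [LinearOrder κ] (key : String → κ) (n : String → Nat)
    (d : List String) (hd : d.Pairwise (fun a b => key a < key b)) :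
    (d.flatMap (fun x => List.replicate (n x) x)).Pairwise (fun a b => key a ≤ key b) := by
  induction d with
  | nil => simp
  | cons x d ih =>
    rcases List.pairwise_cons.mp hd with ⟨hx, hd'⟩
    simp only [List.flatMap_cons]
    rw [List.pairwise_append]
    refine ⟨?_, ih hd', ?_⟩
    · exact List.pairwise_replicate.mpr (Or.inr (le_refl (key x)))
    · intro a ha b hb
      have hax : a = x := List.eq_of_mem_replicate ha
      rcases List.mem_flatMap.mp hb with ⟨y, hy, hby⟩
      have hby' : b = y := List.eq_of_mem_replicate hby
      subst hax; subst hby'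
      exact le_of_lt (hx _ hy)

-- uniqueness of a key-sorted arrangement when the key is injective on its members
theorem pvEq_of_perm_of_pairwise {κ : Type} [LinearOrder κ] (key : String → κ) :
    ∀ (l₁ l₂ : List String), (∀ x ∈ l₂, ∀ y ∈ l₂, key x = key y → x = y) → l₁.Perm l₂ →
    l₁.Pairwise (fun a b => key a ≤ key b) → l₂.Pairwise (fun a b => key a ≤ key b) → l₁ = l₂ := by
  intro l₁
  induction l₁ with
  | nil => intro l₂ _ hp _ _; exact (List.perm_nil.mp hp.symm).symm
  | cons a t₁ ih =>
    intro l₂ hinj hp h₁ h₂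
    cases l₂ with
    | nil => exact absurd hp.symm (by simp)
    | cons b t₂ =>
      have hab : a = b := by
        have hamem : a ∈ b :: t₂ := hp.mem_iff.mp (List.mem_cons_self ..)
        have hbmem : b ∈ a :: t₁ := hp.mem_iff.mpr (List.mem_cons_self ..)
        have h1 : key a ≤ key b := by
          rcases List.mem_cons.mp hbmem with h | h
          · rw [h]
          · exact (List.pairwise_cons.mp h₁).1 b h
        have h2 : key b ≤ key a := by
          rcases List.mem_cons.mp hamem with h | h
          · rw [h]
          · exact (List.pairwise_cons.mp h₂).1 a h
        exact hinj a hamem b (List.mem_cons_self ..) (le_antisymm h1 h2)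
      subst hab
      have hp' : t₁.Perm t₂ := hp.cons_inv
      have : t₁ = t₂ := by
        apply ih t₂ _ hp' (List.pairwise_cons.mp h₁).2 (List.pairwise_cons.mp h₂).2
        intro x hx y hy
        exact hinj x (List.mem_cons_of_mem _ hx) y (List.mem_cons_of_mem _ hy)
      rw [this]

-- ===== VERDICT (by name: the statement is the Claim_ definition above) =====
theorem optimize_load_order_py_spec : Claim_equal_optimize_load_order_py := by
  intro items _
  unfold Spec_optimize_load_order_py optimize_load_order_py_alt
  rw [pvA_closed]
  set key : String → Int := fun x => PySem.Dict.getD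
      ((items.zipIdx).foldl
        (fun d p => if !(PySem.Dict.contains d p.1) then PySem.Dict.insert d p.1 ((p.2 : Nat) : Int) else d)
        PySem.Dict.empty) x 0 with hkey
  have hkeyIdx : ∀ x ∈ items, key x = ((items.idxOf x : Nat) : Int) := by
    intro x hx; exact pvKey_eq_idxOf items x hx
  have hmemA : ∀ x ∈ (PySem.Set.ofList items).flatMap (fun x => List.replicate (items.count x) x), x ∈ items := by
    intro x hx
    rcases List.mem_flatMap.mp hx with ⟨y, hy, hxy⟩
    have := List.eq_of_mem_replicate hxy
    subst this
    exact (PySem.Set.mem_ofList items x).mp hy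
  symm
  apply pvEq_of_perm_of_pairwise key
  · intro x hx y hy hk
    have hx' := hmemA x hx
    have hy' := hmemA y hy
    rw [hkeyIdx x hx', hkeyIdx y hy'] at hk
    have hidx : items.idxOf x = items.idxOf y := by exact_mod_cast hk
    have h1 : items[items.idxOf x]'(List.idxOf_lt_length_of_mem hx') = x := List.getElem_idxOf _
    have h2 : items[items.idxOf y]'(List.idxOf_lt_length_of_mem hy') = y := List.getElem_idxOf _
    rw [← h1, ← h2]
    congr 1
  · exact (PySem.List.sorted_perm items key false).trans (pvPerm items).symm
  · exact PySem.List.sorted_pairwise items key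
  · apply pvPairwise_flatMap key
    apply List.Pairwise.imp_of_mem (R := fun a b => items.idxOf a < items.idxOf b)
    · intro a b ha hb hab
      have ha' := (PySem.Set.mem_ofList items a).mp ha
      have hb' := (PySem.Set.mem_ofList items b).mp hb
      rw [hkeyIdx a ha', hkeyIdx b hb']
      exact_mod_cast hab
    · exact pvOfList_pairwise_idxOf items
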